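-- pv_equiv track=rewrite | github.com/AlejoCNYT/spring-boot-java-assignments | Desktop/ECIGMA/Pashmak_and_Flowers.py | ways_pick_flowers
-- ===== SOURCE A (Python) =====
-- def ways_pick_flowers(m, M, arr):
--     min_r = 0
--     max_r = 0
--     s = len(set(arr))
--     if s == 1 and len(arr) == 2:
--         res = 1
--     elif s == 1 and len(arr) != 2:
--         numer = M
--         res = 0
--         while numer > 1:
--             numer -= 1
--             res += numer
--     else:
--         for num in arr:
--             if num == m:
--                 min_r += 1
--             elif num == M:
--                 max_r += 1
--
--         res = max_r * min_r
--
--     return res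
-- ===== SOURCE B (Python) =====
-- def ways_pick_flowers(m, M, arr):
--     if arr and all(x == arr[0] for x in arr):
--         if len(arr) == 2:
--             return 1
--         return M * (M - 1) // 2 if M > 1 else 0
--     cm = arr.count(m)
--     cM = 0 if m == M else arr.count(M)
--     return cm * cM
-- ===== Notes on version B (the rewrite author's own statement) =====
-- stated objective: faster
-- what changed: Replaced the O(M) decrementing while-loop with the closed form M*(M-1)//2, replaced len(set(arr)) by a single all-equal scan, and replaced the counting for-loop by arr.count.
import Mathlib
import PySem

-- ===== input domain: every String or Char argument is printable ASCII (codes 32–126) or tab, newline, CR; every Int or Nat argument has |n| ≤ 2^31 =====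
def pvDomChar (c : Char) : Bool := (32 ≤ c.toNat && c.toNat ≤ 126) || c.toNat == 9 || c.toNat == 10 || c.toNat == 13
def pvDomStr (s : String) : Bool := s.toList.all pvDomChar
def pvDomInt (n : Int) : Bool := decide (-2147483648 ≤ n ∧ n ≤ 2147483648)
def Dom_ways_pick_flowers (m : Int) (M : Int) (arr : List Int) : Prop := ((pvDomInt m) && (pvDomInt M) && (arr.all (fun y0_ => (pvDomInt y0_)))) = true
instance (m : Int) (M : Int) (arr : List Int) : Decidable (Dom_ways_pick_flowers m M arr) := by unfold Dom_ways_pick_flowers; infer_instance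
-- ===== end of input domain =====

-- ===== PORT A =====
-- B replaces A's O(M) while-loop by the closed form M*(M-1)//2 and A's two scans
-- (len(set(arr)), counting for-loop) by an all-equal scan and arr.count: asymptotically faster.

-- the 'while numer > 1' loop of A, on state (numer, res)
def waysLoop (numer res : Int) : Int :=
  if 1 < numer then waysLoop (numer - 1) (res + (numer - 1)) else res
termination_by numer.toNat
decreasing_by omega

def ways_pick_flowers (m : Int) (M : Int) (arr : List Int) : Int :=
  let s : Int := (PySem.Set.ofList arr).length
  if s = 1 ∧ arr.length = 2 then 1
  else if s = 1 ∧ arr.length ≠ 2 then waysLoop M 0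
  else
    let p := arr.foldl
      (fun (st : Int × Int) num =>
        if num = m then (st.1 + 1, st.2)
        else if num = M then (st.1, st.2 + 1)
        else st) (0, 0)
    p.2 * p.1

-- ===== PORT B =====
-- 'arr and all(x == arr[0] for x in arr)'
def allEqHead (arr : List Int) : Bool :=
  match arr with
  | [] => false
  | a :: _ => arr.all (fun x => x == a)

def ways_pick_flowers_alt (m : Int) (M : Int) (arr : List Int) : Int :=
  if allEqHead arr then
    if arr.length = 2 then 1
    else if 1 < M then PySem.Int.floordiv (M * (M - 1)) 2 else 0
  else
    let cm := PySem.List.count arr m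
    let cM := if m = M then 0 else PySem.List.count arr M
    cm * cM

-- ===== PRECONDITION & SPEC =====
def Spec_ways_pick_flowers (m : Int) (M : Int) (arr : List Int) (out : Int) : Prop := out = ways_pick_flowers_alt m M arr
instance (m : Int) (M : Int) (arr : List Int) (out : Int) : Decidable (Spec_ways_pick_flowers m M arr out) := by unfold Spec_ways_pick_flowers; infer_instance

-- ===== CLAIM (what is proved, stated in full; the proofs are below) =====
def Claim_equal_ways_pick_flowers : Prop := ∀ (m : Int) (M : Int) (arr : List Int), Dom_ways_pick_flowers m M arr → Spec_ways_pick_flowers m M arr (ways_pick_flowers m M arr)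

-- ===== LEMMAS AND PROOFS =====

-- all elements equal the head: set(arr) folds to the singleton [a]
lemma foldl_add_allEq (a : Int) (t : List Int) (h : ∀ x ∈ t, x = a) :
    t.foldl PySem.Set.add [a] = [a] := by
  induction t with
  | nil => rfl
  | cons b u ih =>
      have hb : b = a := h b (by simp)
      subst hb
      simp only [List.foldl_cons]
      have : PySem.Set.add [b] b = [b] := by
        simp [PySem.Set.add, PySem.Set.contains]
      rw [this]
      exact ih (fun x hx => h x (by simp [hx]))

lemma length_ne_one_of_two_mem {s : List Int} {y z : Int}
    (hy : y ∈ s) (hz : z ∈ s) (hne : y ≠ z) : s.length ≠ 1 := by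
  intro hlen
  match s, hlen with
  | [w], _ =>
      simp at hy hz
      exact hne (hy.trans hz.symm)

lemma ofList_length_one_iff (arr : List Int) :
    ((PySem.Set.ofList arr).length = 1) ↔ allEqHead arr = true := by
  cases arr with
  | nil => simp [PySem.Set.ofList, allEqHead]
  | cons a t =>
      constructor
      · intro h
        simp only [allEqHead, List.all_eq_true]
        intro x hx
        by_contra hne
        have hxm : x ∈ PySem.Set.ofList (a :: t) := by
          rw [PySem.Set.mem_ofList]; exact hx
        have ham : a ∈ PySem.Set.ofList (a :: t) := by
          rw [PySem.Set.mem_ofList]; simp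
        have : x ≠ a := by simpa using hne
        exact length_ne_one_of_two_mem hxm ham this h
      · intro h
        simp only [allEqHead, List.all_eq_true] at h
        have hall : ∀ x ∈ t, x = a := by
          intro x hx
          have := h x (by simp [hx])
          simpa using this
        have : PySem.Set.ofList (a :: t) = [a] := by
          rw [PySem.Set.ofList_eq_foldl]
          simp only [List.foldl_cons]
          have : PySem.Set.add [] a = [a] := by
            simp [PySem.Set.add, PySem.Set.contains]
          rw [this]
          exact foldl_add_allEq a t hall
        simp [this]

-- closed form of A's while-loop
lemma waysLoop_eq (n r : Int) :
    waysLoop n r = r + (if 1 < n then PySem.Int.floordiv (n * (n - 1)) 2 else 0) := by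
  by_cases h : 1 < n
  · have key : ∀ (k : Nat) (n r : Int), n.toNat = k → 1 < n →
        waysLoop n r = r + PySem.Int.floordiv (n * (n - 1)) 2 := by
      intro k
      induction k with
      | zero => intro n r hk hn; omega
      | succ k ih =>
          intro n r hk hn
          rw [waysLoop, if_pos hn]
          by_cases h2 : 1 < n - 1
          · rw [ih (n - 1) (r + (n - 1)) (by omega) h2]
            rw [PySem.Int.floordiv_eq_ediv_of_pos (by norm_num),
                PySem.Int.floordiv_eq_ediv_of_pos (by norm_num)]
            have hexp : n * (n - 1) = (n - 1) * (n - 2) + (n - 1) * 2 := by ring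
            rw [hexp, Int.add_mul_ediv_right _ _ (by norm_num : (2:Int) ≠ 0)]
            ring
          · have hn2 : n = 2 := by omega
            subst hn2
            rw [waysLoop]
            norm_num [PySem.Int.floordiv_eq_ediv_of_pos]
    rw [if_pos h]
    exact key n.toNat n r rfl h
  · rw [waysLoop, if_neg h, if_neg h]
    omega

-- A's counting fold, with accumulator generalized
lemma count_fold (m M : Int) (arr : List Int) (c d : Int) :
    arr.foldl
      (fun (st : Int × Int) num =>
        if num = m then (st.1 + 1, st.2)
        else if num = M then (st.1, st.2 + 1)
        else st) (c, d)
    = (c + PySem.List.count arr m,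
       d + (if m = M then 0 else PySem.List.count arr M)) := by
  induction arr generalizing c d with
  | nil => simp [PySem.List.count]
  | cons a t ih =>
      simp only [List.foldl_cons]
      by_cases ham : a = m
      · subst ham
        rw [if_pos rfl, ih]
        by_cases hmM : a = M
        · simp [PySem.List.count, hmM]
          ring_nf
        · simp [PySem.List.count, hmM]
          ring_nf
      · rw [if_neg ham]
        by_cases haM : a = M
        · subst haM
          rw [if_pos rfl, ih]
          have hmM : ¬ (m = a) := fun h => ham h.symm
          simp [PySem.List.count, ham, hmM]
          ring_nf
        · rw [if_neg haM, ih]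
          simp [PySem.List.count, ham, haM]

-- ===== VERDICT (by name: the statement is the Claim_ definition above) =====
theorem ways_pick_flowers_spec : Claim_equal_ways_pick_flowers := by
  intro m M arr _
  unfold Spec_ways_pick_flowers ways_pick_flowers ways_pick_flowers_alt
  by_cases hall : allEqHead arr = true
  · have hs : ((PySem.Set.ofList arr).length : Int) = 1 := by
      have := (ofList_length_one_iff arr).mpr hall
      exact_mod_cast this
    by_cases h2 : arr.length = 2
    · simp [hs, h2, hall]
    · simp only [hs, h2, hall, and_true, and_false, if_true, if_false,
        not_false_eq_true, ne_eq]
      rw [waysLoop_eq M 0]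
      simp
  · have hs : ¬ ((PySem.Set.ofList arr).length : Int) = 1 := by
      intro h
      exact hall ((ofList_length_one_iff arr).mp (by exact_mod_cast h))
    simp only [hs, false_and, if_false, hall]
    rw [count_fold m M arr 0 0]
    simp [mul_comm]
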